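-- pv_equiv track=rewrite | github.com/artemfomin/geekbrains.data-science | 1. Знакомство с Python/1-3.py | find_strange_number
-- ===== SOURCE A (Python) =====
-- def find_strange_number(number: int, times: int):
--     if not (isinstance(number, int) and isinstance(times, int)):
--         raise TypeError
--     strange_number = 0
--     strange_result = 0
--     for i in range(times):
--         strange_number += (10 ** i) * number
--         strange_result += strange_number
--     return strange_result
-- ===== SOURCE B (Python) =====
-- def find_strange_number(number: int, times: int):
--     if not (isinstance(number, int) and isinstance(times, int)):
--         raise TypeError
--     if times <= 0:
--         return 0
--     # sum_{k=1}^{times} number * repunit(k) = number * (10^(times+1) - 10 - 9*times) / 81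
--     return number * ((10 ** (times + 1) - 10 - 9 * times) // 81)
-- ===== Notes on version B (the rewrite author's own statement) =====
-- stated objective: faster
-- what changed: Replaced the O(times)-iteration accumulation of repunit multiples by the closed-form geometric-series formula number*(10^(times+1)-10-9*times)//81 with one exact integer division.
import Mathlib
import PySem

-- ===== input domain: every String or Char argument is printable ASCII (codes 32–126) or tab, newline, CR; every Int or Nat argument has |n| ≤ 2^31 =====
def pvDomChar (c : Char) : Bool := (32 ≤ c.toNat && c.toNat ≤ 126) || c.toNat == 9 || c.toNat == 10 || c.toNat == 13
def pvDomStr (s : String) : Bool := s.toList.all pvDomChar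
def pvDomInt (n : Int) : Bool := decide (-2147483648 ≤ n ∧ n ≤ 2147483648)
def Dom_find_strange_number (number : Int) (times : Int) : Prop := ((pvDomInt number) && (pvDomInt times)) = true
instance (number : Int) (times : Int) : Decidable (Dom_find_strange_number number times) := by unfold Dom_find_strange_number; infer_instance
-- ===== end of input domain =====

-- B replaces A's per-step accumulation loop by the closed-form geometric-series sum
-- number * (10^(times+1) - 10 - 9*times) // 81 (objective: faster, one power instead of a loop).

-- ===== PORT A =====
-- loop state: (strange_number, strange_result)
def find_strange_number (number : Int) (times : Int) : Int :=
  (((PySem.List.pyRange 0 times 1).foldl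
      (fun (st : Int × Int) (i : Int) =>
        let sn := st.1 + 10 ^ i.toNat * number
        (sn, st.2 + sn))
      (0, 0))).2

-- ===== PORT B =====
def find_strange_number_alt (number : Int) (times : Int) : Int :=
  if times ≤ 0 then 0
  else number * PySem.Int.floordiv (10 ^ (times + 1).toNat - 10 - 9 * times) 81

-- ===== PRECONDITION & SPEC =====
def Spec_find_strange_number (number : Int) (times : Int) (out : Int) : Prop := out = find_strange_number_alt number times
instance (number : Int) (times : Int) (out : Int) : Decidable (Spec_find_strange_number number times out) := by unfold Spec_find_strange_number; infer_instance

-- ===== CLAIM (what is proved, stated in full; the proofs are below) =====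
def Claim_equal_find_strange_number : Prop := ∀ (number : Int) (times : Int), Dom_find_strange_number number times → Spec_find_strange_number number times (find_strange_number number times)

-- ===== LEMMAS AND PROOFS =====

-- the loop over range(0, n) starting from (sn, sr)
theorem pv_loop_shift (number : Int) (n : ℕ) (sn sr : Int) :
    ((List.range n).map (fun k : ℕ => (k : Int))).foldl
      (fun (st : Int × Int) (i : Int) =>
        let s := st.1 + 10 ^ i.toNat * number
        (s, st.2 + s)) (sn, sr)
    = (sn + number * ((Finset.range n).sum fun k => 10 ^ k),
       sr + n * sn + number * ((Finset.range n).sum fun k => ((n : Int) - k) * 10 ^ k)) := by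
  induction n generalizing sn sr with
  | zero => simp
  | succ m ih =>
    rw [List.range_succ, List.map_append, List.foldl_append]
    simp only [List.map_cons, List.map_nil, List.foldl_cons, List.foldl_nil]
    rw [ih]
    simp only [Int.toNat_natCast]
    rw [Prod.mk.injEq]
    constructor
    · rw [Finset.sum_range_succ]; ring
    · push_cast
      rw [Finset.sum_range_succ (fun k => ((m:Int)+1 - k) * 10 ^ k)]
      have : ((Finset.range m).sum fun k => ((m:Int) + 1 - k) * 10 ^ k)
           = ((Finset.range m).sum fun k => ((m:Int) - k) * 10 ^ k)
           + ((Finset.range m).sum fun k => (10:Int) ^ k) := by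
        rw [← Finset.sum_add_distrib]; apply Finset.sum_congr rfl; intro k _; ring
      rw [this]; ring

theorem pv_geom (n : ℕ) : (9 : Int) * ((Finset.range n).sum fun k => 10 ^ k) = 10 ^ n - 1 := by
  induction n with
  | zero => simp
  | succ m ih => rw [Finset.sum_range_succ]; rw [pow_succ]; omega

theorem pv_sum2 (n : ℕ) :
    (81 : Int) * ((Finset.range n).sum fun k => ((n : Int) - k) * 10 ^ k)
    = 10 ^ (n + 1) - 10 - 9 * n := by
  induction n with
  | zero => simp
  | succ m ih =>
    rw [Finset.sum_range_succ]
    have split : ((Finset.range m).sum fun k => ((m:Int)+1 - k) * 10 ^ k)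
        = ((Finset.range m).sum fun k => ((m:Int) - k) * 10 ^ k)
        + ((Finset.range m).sum fun k => (10:Int) ^ k) := by
      rw [← Finset.sum_add_distrib]; apply Finset.sum_congr rfl; intro k _; ring
    push_cast
    rw [split]
    have g := pv_geom m
    have : (81:Int) * ((Finset.range m).sum fun k => (10:Int) ^ k) = 9 * (10 ^ m - 1) := by
      rw [← g]; ring
    rw [mul_add, mul_add, ih, this]
    rw [pow_succ (10:Int) (m+1), pow_succ (10:Int) m]
    ring

-- ===== VERDICT (by name: the statement is the Claim_ definition above) =====
theorem find_strange_number_spec : Claim_equal_find_strange_number := by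
  unfold Claim_equal_find_strange_number
  intro number times _
  unfold Spec_find_strange_number find_strange_number find_strange_number_alt
  by_cases h : times ≤ 0
  · rw [PySem.List.pyRange_one_eq_nil (by omega)]
    simp [h]
  · rw [if_neg h]
    rw [PySem.List.pyRange_one]
    have hm : ((List.range (times - 0).toNat).map fun k : ℕ => (0 : Int) + k)
            = (List.range times.toNat).map (fun k : ℕ => (k : Int)) := by
      simp
    rw [hm, pv_loop_shift]
    have ht1 : (times + 1).toNat = times.toNat + 1 := by omega
    have ht : (times.toNat : Int) = times := by omega
    rw [ht1]
    rw [PySem.Int.floordiv_eq_ediv_of_pos (by norm_num)]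
    have h81 : (10 : Int) ^ (times.toNat + 1) - 10 - 9 * times
             = 81 * ((Finset.range times.toNat).sum fun k => ((times.toNat : Int) - k) * 10 ^ k) := by
      rw [pv_sum2, ht]
    rw [h81, Int.mul_ediv_cancel_left _ (by norm_num)]
    push_cast
    ring
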